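-- pv_equiv track=rewrite | github.com/rawanvib/slurp | ingredient_parser_v2.py | replace_str_index_to
-- ===== SOURCE A (Python) =====
-- def replace_str_index_to(text, index, end_index):
--     output = ''
--     # end_index = end_index + 1
--     for i, j in enumerate(text):
--         if index <= i < end_index:
--             output = output + " "
--         else:
--             output = output + j
--     return output
-- ===== SOURCE B (Python) =====
-- def replace_str_index_to(text, index, end_index):
--     n = len(text)
--     start = min(max(0, index), n)
--     end = min(max(start, end_index), n)
--     return text[:start] + ' ' * (end - start) + text[end:]
-- ===== Notes on version B (the rewrite author's own statement) =====
-- stated objective: faster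
-- what changed: Replaces the per-character loop with range-membership test and repeated string concatenation by clamped slicing: prefix + a run of spaces + suffix, built in one concatenation.
import Mathlib
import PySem

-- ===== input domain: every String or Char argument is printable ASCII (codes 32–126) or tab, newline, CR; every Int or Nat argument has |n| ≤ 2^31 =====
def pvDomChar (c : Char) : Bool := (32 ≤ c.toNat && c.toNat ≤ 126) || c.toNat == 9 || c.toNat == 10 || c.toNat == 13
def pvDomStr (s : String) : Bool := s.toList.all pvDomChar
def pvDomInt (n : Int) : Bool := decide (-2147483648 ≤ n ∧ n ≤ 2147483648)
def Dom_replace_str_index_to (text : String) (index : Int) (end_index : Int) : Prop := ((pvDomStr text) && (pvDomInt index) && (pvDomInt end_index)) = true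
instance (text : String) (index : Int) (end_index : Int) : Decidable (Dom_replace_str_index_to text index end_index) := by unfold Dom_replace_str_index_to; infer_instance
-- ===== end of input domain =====

-- B replaces A's per-character loop (membership test + repeated string concatenation)
-- by clamped slicing: prefix + run of spaces + suffix; measurably faster on large inputs.


-- ===== PORT A =====
-- output accumulated as a List Char; 'output + " "' / 'output + j' is list append of one char
def replace_str_index_to (text : String) (index : Int) (end_index : Int) : String :=
  String.ofList ((PySem.List.enumerate text.toList).foldl
    (fun out p => if index ≤ p.1 ∧ p.1 < end_index then out ++ [' '] else out ++ [p.2]) [])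

-- ===== PORT B =====
-- start/end are clamped into [0, n], so text[:start] / text[end:] are exactly take/drop,
-- and ' ' * (end - start) is List.replicate (end - start ≥ 0 by construction)
def replace_str_index_to_alt (text : String) (index : Int) (end_index : Int) : String :=
  let cs := text.toList
  let n : Int := cs.length
  let start := min (max 0 index) n
  let stop := min (max start end_index) n
  String.ofList (cs.take start.toNat ++ List.replicate (stop - start).toNat ' ' ++ cs.drop stop.toNat)

-- ===== PRECONDITION & SPEC =====
def Spec_replace_str_index_to (text : String) (index : Int) (end_index : Int) (out : String) : Prop := out = replace_str_index_to_alt text index end_index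
instance (text : String) (index : Int) (end_index : Int) (out : String) : Decidable (Spec_replace_str_index_to text index end_index out) := by unfold Spec_replace_str_index_to; infer_instance

-- ===== CLAIM (what is proved, stated in full; the proofs are below) =====
def Claim_equal_replace_str_index_to : Prop := ∀ (text : String) (index : Int) (end_index : Int), Dom_replace_str_index_to text index end_index → Spec_replace_str_index_to text index end_index (replace_str_index_to text index end_index)

-- ===== LEMMAS AND PROOFS =====

theorem enum_length (cs : List Char) : ∀ s : Int, (PySem.List.enumerate cs s).length = cs.length := by
  induction cs with
  | nil => intro s; simp [PySem.List.enumerate_nil]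
  | cons x xs ih => intro s; simp [PySem.List.enumerate_cons, ih]

theorem enum_getElem (cs : List Char) : ∀ (s : Int) (i : Nat) (h : i < cs.length),
    (PySem.List.enumerate cs s)[i]'(by rw [enum_length]; exact h) = (s + i, cs[i]) := by
  induction cs with
  | nil => intro s i h; simp at h
  | cons x xs ih =>
    intro s i h
    cases i with
    | zero => simp [PySem.List.enumerate_cons]
    | succ k =>
      have hk : k < xs.length := by simpa using h
      simp [PySem.List.enumerate_cons, ih (s+1) k hk]
      ring

theorem foldA (index end_index : Int) (cs : List Char) : ∀ (s : Int) (out : List Char),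
    (PySem.List.enumerate cs s).foldl
      (fun out p => if index ≤ p.1 ∧ p.1 < end_index then out ++ [' '] else out ++ [p.2]) out
    = out ++ (PySem.List.enumerate cs s).map
        (fun p => if index ≤ p.1 ∧ p.1 < end_index then ' ' else p.2) := by
  induction cs with
  | nil => intro s out; simp [PySem.List.enumerate_nil]
  | cons x xs ih =>
    intro s out
    simp only [PySem.List.enumerate_cons, List.foldl_cons, List.map_cons, ih]
    split <;> simp

theorem main_eq (cs : List Char) (index end_index : Int) :
    (PySem.List.enumerate cs 0).map
        (fun p => if index ≤ p.1 ∧ p.1 < end_index then ' ' else p.2)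
    = cs.take (min (max 0 index) (cs.length : Int)).toNat
      ++ List.replicate ((min (max (min (max 0 index) (cs.length : Int)) end_index) (cs.length : Int))
            - (min (max 0 index) (cs.length : Int))).toNat ' '
      ++ cs.drop (min (max (min (max 0 index) (cs.length : Int)) end_index) (cs.length : Int)).toNat := by
  set n : Int := (cs.length : Int) with hn
  set start : Int := min (max 0 index) n with hstart
  set stop : Int := min (max start end_index) n with hstop
  have h0s : 0 ≤ start := by omega
  have hse : start ≤ stop := by omega
  have hen : stop ≤ n := by omega
  have hstN : (start.toNat : Int) = start := Int.toNat_of_nonneg h0s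
  have hspN : (stop.toNat : Int) = stop := Int.toNat_of_nonneg (le_trans h0s hse)
  have hlen : stop.toNat ≤ cs.length := by omega
  have hlen2 : start.toNat ≤ cs.length := by omega
  apply List.ext_getElem
  · simp [List.length_take, List.length_drop, List.length_append, List.length_replicate]
    omega
  · intro i h1 h2
    rw [List.getElem_map, enum_getElem cs 0 i (by simpa [enum_length] using h1)]
    have hi : i < cs.length := by simpa [enum_length] using h1
    simp only [zero_add]
    by_cases c1 : i < start.toNat
    · rw [List.getElem_append_left (by simp [List.length_take, List.length_replicate]; omega),
          List.getElem_append_left (by simp [List.length_take]; omega),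
          List.getElem_take]
      have hc : ¬ (index ≤ (i : Int) ∧ (i : Int) < end_index) := by omega
      simp [hc]
    · by_cases c2 : i < stop.toNat
      · rw [List.getElem_append_left (by simp [List.length_take, List.length_replicate]; omega),
            List.getElem_append_right (by simp [List.length_take]; omega),
            List.getElem_replicate]
        have hc : index ≤ (i : Int) ∧ (i : Int) < end_index := by constructor <;> omega
        simp [hc]
      · rw [List.getElem_append_right (by simp [List.length_take, List.length_replicate]; omega),
            List.getElem_drop]
        have hc : ¬ (index ≤ (i : Int) ∧ (i : Int) < end_index) := by omega
        simp only [hc, if_false]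
        congr 1
        simp [List.length_take, List.length_replicate]
        omega

-- ===== VERDICT (by name: the statement is the Claim_ definition above) =====
theorem replace_str_index_to_spec : Claim_equal_replace_str_index_to := by
  intro text index end_index _
  show _ = _
  unfold replace_str_index_to replace_str_index_to_alt
  rw [foldA, List.nil_append, main_eq]
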